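-- pv_equiv track=rewrite | github.com/jimth001/my-tf-framework-for-nlp-tasks | Models/GPTModel.py | parse_out_idx
-- ===== SOURCE A (Python) =====
-- from typing import List, Dict, Any, NoReturn
--
-- def parse_out_idx(index_list: List[int], eos_id: int):
--     r = []
--     index_list = index_list[1:]
--     for x in index_list:
--         if x != eos_id:
--             r.append(x)
--         else:
--             break
--     return r
-- ===== SOURCE B (Python) =====
-- def parse_out_idx(index_list, eos_id):
--     try:
--         cut = index_list.index(eos_id, 1)
--     except ValueError:
--         return index_list[1:]
--     return index_list[1:cut]
-- ===== Notes on version B (the rewrite author's own statement) =====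
-- stated objective: idiomatic
-- what changed: B locates the eos terminator with list.index(eos_id, 1) and returns the slice index_list[1:cut] (falling back to index_list[1:] on ValueError), replacing A's element-by-element append loop with break.
import Mathlib
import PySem

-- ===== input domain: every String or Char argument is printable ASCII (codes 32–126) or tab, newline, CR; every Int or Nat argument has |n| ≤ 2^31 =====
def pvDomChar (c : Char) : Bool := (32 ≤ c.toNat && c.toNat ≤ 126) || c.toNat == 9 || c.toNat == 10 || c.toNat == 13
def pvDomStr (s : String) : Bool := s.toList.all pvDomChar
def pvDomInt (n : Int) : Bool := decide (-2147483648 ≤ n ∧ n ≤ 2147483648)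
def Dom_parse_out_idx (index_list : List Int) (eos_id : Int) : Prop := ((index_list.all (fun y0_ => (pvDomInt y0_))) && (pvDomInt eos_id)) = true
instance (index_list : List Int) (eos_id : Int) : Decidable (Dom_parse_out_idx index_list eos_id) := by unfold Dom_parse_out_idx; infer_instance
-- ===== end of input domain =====

-- B replaces A's element-by-element append loop with find-the-eos-index-then-slice (idiomatic; same cost).
-- ===== PORT A =====
-- A's loop with break, transliterated as structural recursion over the sliced list
def pvLoopA : List Int → Int → List Int → List Int
  | [], _, r => r
  | x :: xs, eos_id, r =>
      if x ≠ eos_id then pvLoopA xs eos_id (r ++ [x]) else r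

def parse_out_idx (index_list : List Int) (eos_id : Int) : List Int :=
  pvLoopA (PySem.List.slice index_list (some 1) none) eos_id []

-- ===== PORT B =====
-- index_list.index(eos_id, 1) = first index in the tail, shifted by 1; ValueError branch = none
def parse_out_idx_alt (index_list : List Int) (eos_id : Int) : List Int :=
  match (PySem.List.index? (PySem.List.slice index_list (some 1) none) eos_id).map (fun k => k + 1) with
  | none => PySem.List.slice index_list (some 1) none
  | some cut => PySem.List.slice index_list (some 1) (some ((cut : Nat) : Int))

-- ===== PRECONDITION & SPEC =====
def Spec_parse_out_idx (index_list : List Int) (eos_id : Int) (out : List Int) : Prop := out = parse_out_idx_alt index_list eos_id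
instance (index_list : List Int) (eos_id : Int) (out : List Int) : Decidable (Spec_parse_out_idx index_list eos_id out) := by unfold Spec_parse_out_idx; infer_instance

-- ===== CLAIM (what is proved, stated in full; the proofs are below) =====
def Claim_equal_parse_out_idx : Prop := ∀ (index_list : List Int) (eos_id : Int), Dom_parse_out_idx index_list eos_id → Spec_parse_out_idx index_list eos_id (parse_out_idx index_list eos_id)

-- ===== LEMMAS AND PROOFS =====

-- ===== VERDICT (by name: the statement is the Claim_ definition above) =====
lemma pvLoopA_eq (t : List Int) (eos : Int) (r : List Int) :
    pvLoopA t eos r = r ++ t.takeWhile (· ≠ eos) := by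
  induction t generalizing r with
  | nil => simp [pvLoopA]
  | cons x xs ih =>
      by_cases h : x = eos
      · simp [pvLoopA, h, List.takeWhile]
      · simp [pvLoopA, h, List.takeWhile, ih]

lemma takeWhile_of_not_mem (t : List Int) (eos : Int) (h : eos ∉ t) :
    t.takeWhile (· ≠ eos) = t := by
  rw [List.takeWhile_eq_self_iff]
  intro x hx
  simp only [ne_eq, decide_eq_true_eq]
  exact fun he => h (he ▸ hx)

lemma takeWhile_append_eos (pre suf : List Int) (eos : Int) (h : eos ∉ pre) :
    (pre ++ eos :: suf).takeWhile (· ≠ eos) = pre := by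
  induction pre with
  | nil => simp
  | cons x xs ih =>
      simp only [List.mem_cons, not_or] at h
      have hx : x ≠ eos := fun he => h.1 he.symm
      rw [List.cons_append, List.takeWhile_cons_of_pos (by simp [hx]), ih h.2]

theorem parse_out_idx_spec : Claim_equal_parse_out_idx := by
  intro il eos _
  unfold Spec_parse_out_idx parse_out_idx parse_out_idx_alt
  rw [pvLoopA_eq, List.nil_append]
  cases hidx : PySem.List.index? (PySem.List.slice il (some 1) none) eos with
  | none =>
      have hmem : eos ∉ PySem.List.slice il (some 1) none :=
        (PySem.List.index?_eq_none_iff _ _).1 hidx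
      simp only [Option.map_none]
      exact takeWhile_of_not_mem _ _ hmem
  | some k =>
      obtain ⟨pre, suf, hteq, hlen, hnot⟩ := (PySem.List.index?_eq_some_iff _ _ _).1 hidx
      simp only [Option.map_some]
      have htail : il.tail = pre ++ eos :: suf := by
        rw [← PySem.List.slice_from_one, hteq]
      have h1 : (1 : Int) = ((1 : Nat) : Int) := rfl
      rw [hteq, takeWhile_append_eos _ _ _ hnot, h1, PySem.List.slice_natCast]
      have hsub : k + 1 - 1 = k := rfl
      rw [hsub, List.drop_one, htail, ← hlen, List.take_left]
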